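-- pv_equiv track=rewrite | github.com/jennyzzt/omni | envs/env_utils.py | get_compound_tasks
-- ===== SOURCE A (Python) =====
-- from itertools import combinations
--
-- def get_compound_tasks(tasks, maxcomp=2, naive=True):
--   alltasks = []
--   newalltasks = []
--   if naive:
--     # if naive=True, return repetitions and different orders as different tasks
--     for i in range(maxcomp):
--       newalltasks = [[xs] for xs in tasks]
--       for comptask in alltasks:
--         for ach in tasks:
--           newalltasks.append([*comptask, ach])
--       alltasks = newalltasks
--       newalltasks = []
--   else:
--     # else, don't return repetitions and different orders are the same task
--     for i in range(2, maxcomp + 1):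
--       alltasks += [list(xs) for xs in combinations(tasks, i)]
--   return alltasks
-- ===== SOURCE B (Python) =====
-- from itertools import combinations, product
--
-- def get_compound_tasks(tasks, maxcomp=2, naive=True):
--   alltasks = []
--   if naive:
--     # enumerate each length directly instead of extending the previous level
--     for i in range(1, maxcomp + 1):
--       alltasks += [list(p) for p in product(tasks, repeat=i)]
--   else:
--     for i in range(2, maxcomp + 1):
--       alltasks += [list(xs) for xs in combinations(tasks, i)]
--   return alltasks
-- ===== Notes on version B (the rewrite author's own statement) =====
-- stated objective: idiomatic
-- what changed: The naive branch enumerates each length independently with itertools.product(tasks, repeat=i) instead of incrementally extending the previous level's accumulated result list; the non-naive combinations branch is unchanged.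
import Mathlib
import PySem

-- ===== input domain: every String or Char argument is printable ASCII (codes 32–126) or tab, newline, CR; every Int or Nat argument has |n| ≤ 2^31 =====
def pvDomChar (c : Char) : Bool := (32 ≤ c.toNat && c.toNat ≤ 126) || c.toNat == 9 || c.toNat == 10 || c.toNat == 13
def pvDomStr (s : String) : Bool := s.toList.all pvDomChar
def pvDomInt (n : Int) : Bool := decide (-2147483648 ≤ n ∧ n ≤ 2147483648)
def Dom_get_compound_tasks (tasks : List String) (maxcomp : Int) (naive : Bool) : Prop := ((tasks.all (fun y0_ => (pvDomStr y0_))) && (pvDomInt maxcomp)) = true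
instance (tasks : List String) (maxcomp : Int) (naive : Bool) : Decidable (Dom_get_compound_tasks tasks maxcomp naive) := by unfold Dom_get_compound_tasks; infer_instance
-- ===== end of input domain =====

-- B replaces A's level-by-level extension of the previous result with direct per-length
-- product enumeration (idiomatic itertools.product); return value only, no mutation.

-- ===== PORT A =====
-- itertools.combinations(xs, n) in lexicographic-by-index order (shared helper: both Pythons call it)
def pvComb (xs : List String) : Nat → List (List String)
  | 0 => [[]]
  | n+1 =>
    match xs with
    | [] => []
    | x :: rest => (pvComb rest n).map (fun c => x :: c) ++ pvComb rest (n+1)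

def get_compound_tasks (tasks : List String) (maxcomp : Int) (naive : Bool) : List (List String) :=
  if naive then
    -- for i in range(maxcomp): newalltasks = singletons; nested append loops; alltasks = newalltasks
    (PySem.List.pyRange 0 maxcomp 1).foldl
      (fun alltasks _ =>
        alltasks.foldl
          (fun newalltasks comptask =>
            tasks.foldl (fun acc ach => acc ++ [comptask ++ [ach]]) newalltasks)
          (tasks.map (fun xs => [xs])))
      []
  else
    -- for i in range(2, maxcomp+1): alltasks += [list(xs) for xs in combinations(tasks, i)]
    (PySem.List.pyRange 2 (maxcomp + 1) 1).foldl
      (fun alltasks i => alltasks ++ pvComb tasks i.toNat) []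

-- ===== PORT B =====
-- itertools.product(tasks, repeat=n) in lexicographic order (first coordinate most significant)
def pvProd (tasks : List String) : Nat → List (List String)
  | 0 => [[]]
  | n+1 => tasks.flatMap (fun t => (pvProd tasks n).map (fun p => t :: p))

def get_compound_tasks_alt (tasks : List String) (maxcomp : Int) (naive : Bool) : List (List String) :=
  if naive then
    -- for i in range(1, maxcomp+1): alltasks += [list(p) for p in product(tasks, repeat=i)]
    (PySem.List.pyRange 1 (maxcomp + 1) 1).foldl
      (fun alltasks i => alltasks ++ pvProd tasks i.toNat) []
  else
    (PySem.List.pyRange 2 (maxcomp + 1) 1).foldl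
      (fun alltasks i => alltasks ++ pvComb tasks i.toNat) []

-- ===== PRECONDITION & SPEC =====
def Spec_get_compound_tasks (tasks : List String) (maxcomp : Int) (naive : Bool) (out : List (List String)) : Prop := out = get_compound_tasks_alt tasks maxcomp naive
instance (tasks : List String) (maxcomp : Int) (naive : Bool) (out : List (List String)) : Decidable (Spec_get_compound_tasks tasks maxcomp naive out) := by unfold Spec_get_compound_tasks; infer_instance

-- ===== CLAIM (what is proved, stated in full; the proofs are below) =====
def Claim_equal_get_compound_tasks : Prop := ∀ (tasks : List String) (maxcomp : Int) (naive : Bool), Dom_get_compound_tasks tasks maxcomp naive → Spec_get_compound_tasks tasks maxcomp naive (get_compound_tasks tasks maxcomp naive)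

-- ===== LEMMAS AND PROOFS =====

-- one pass of A's outer loop, after the two inner append-loops are flattened
def pvExt (tasks : List String) (c : List String) : List (List String) :=
  tasks.map (fun a => c ++ [a])

-- extending every length-n product by one element on the right gives the length-(n+1) products
theorem pvProd_flatMap_ext (tasks : List String) (n : Nat) :
    (pvProd tasks n).flatMap (pvExt tasks) = pvProd tasks (n + 1) := by
  induction n with
  | zero => simp [pvProd, pvExt, ← List.map_eq_flatMap]
  | succ n ih =>
    calc (pvProd tasks (n+1)).flatMap (pvExt tasks)
        = tasks.flatMap (fun t => ((pvProd tasks n).flatMap (pvExt tasks)).map (fun p => t :: p)) := by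
          simp only [pvProd, List.flatMap_assoc, List.flatMap_map, List.map_flatMap]
          refine congrArg (fun g => List.flatMap g tasks) (funext fun t => ?_)
          refine congrArg (fun g => List.flatMap g (pvProd tasks n)) (funext fun p => ?_)
          simp [pvExt, Function.comp, List.map_map]
      _ = pvProd tasks (n + 2) := by rw [ih]; simp [pvProd]

-- A's naive loop body in closed form
theorem pvStep_eq (tasks : List String) (X : List (List String)) :
    X.foldl
      (fun newalltasks comptask =>
        tasks.foldl (fun acc ach => acc ++ [comptask ++ [ach]]) newalltasks)
      (tasks.map (fun xs => [xs]))
    = tasks.map (fun xs => [xs]) ++ X.flatMap (pvExt tasks) := by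
  have h : ∀ (init : List (List String)),
      X.foldl (fun newalltasks comptask =>
        tasks.foldl (fun acc ach => acc ++ [comptask ++ [ach]]) newalltasks) init
      = init ++ X.flatMap (pvExt tasks) := by
    induction X with
    | nil => simp
    | cons c X ih =>
      intro init
      rw [List.foldl_cons, PySem.List.foldl_append_singleton_eq_map, ih]
      simp [pvExt, List.append_assoc]
  exact h _

-- concatenating products of lengths 1,2..k+1 from the front or from the back
theorem pvShift (tasks : List String) (k : Nat) :
    pvProd tasks 1 ++ (List.range k).flatMap (fun j => pvProd tasks (j + 2))
      = (List.range k).flatMap (fun j => pvProd tasks (j + 1)) ++ pvProd tasks (k + 1) := by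
  induction k with
  | zero => simp
  | succ k ih =>
    rw [List.range_succ, List.flatMap_append, List.flatMap_append, ← List.append_assoc, ih]
    simp [List.append_assoc]

-- k iterations of A's naive loop = concatenation of the products of lengths 1..k
theorem pvNaive_eq (tasks : List String) (k : Nat) :
    (List.range k).foldl
      (fun alltasks _ =>
        alltasks.foldl
          (fun newalltasks comptask =>
            tasks.foldl (fun acc ach => acc ++ [comptask ++ [ach]]) newalltasks)
          (tasks.map (fun xs => [xs])))
      []
    = (List.range k).flatMap (fun j => pvProd tasks (j + 1)) := by
  induction k with
  | zero => simp
  | succ k ih =>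
    rw [List.range_succ, List.foldl_append, List.foldl_cons, List.foldl_nil, ih, pvStep_eq,
      List.flatMap_append, List.flatMap_assoc]
    have h2 : (List.range k).flatMap (fun j => (pvProd tasks (j + 1)).flatMap (pvExt tasks))
        = (List.range k).flatMap (fun j => pvProd tasks (j + 2)) :=
      congrArg (fun g => List.flatMap g (List.range k))
        (funext fun j => pvProd_flatMap_ext tasks (j + 1))
    have h1 : tasks.map (fun xs => [xs]) = pvProd tasks 1 := by
      simp [pvProd, ← List.map_eq_flatMap]
    rw [h2, h1]
    simpa using pvShift tasks k

-- a fold whose body ignores the element depends only on the list's length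
theorem pvFoldl_ignore {α : Type} (f : List (List String) → List (List String))
    (l : List α) (init : List (List String)) :
    l.foldl (fun acc _ => f acc) init = (List.range l.length).foldl (fun acc _ => f acc) init := by
  induction l generalizing init with
  | nil => simp
  | cons x xs ih => simpa [List.range_succ_eq_map, List.foldl_map] using ih (f init)

-- ===== VERDICT (by name: the statement is the Claim_ definition above) =====
theorem get_compound_tasks_spec : Claim_equal_get_compound_tasks := by
  intro tasks maxcomp naive _
  unfold Spec_get_compound_tasks get_compound_tasks get_compound_tasks_alt
  cases naive with
  | false => rfl
  | true =>
    simp only [reduceIte]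
    rw [pvFoldl_ignore, PySem.List.length_pyRange_one, pvNaive_eq,
      PySem.List.foldl_append_eq_flatMap, PySem.List.pyRange_one 1 (maxcomp + 1),
      List.flatMap_map]
    have hlen : (maxcomp + 1 - 1).toNat = (maxcomp - 0).toNat := by omega
    rw [hlen]
    symm
    simp only [List.nil_append]
    refine congrArg (fun g => List.flatMap g (List.range (maxcomp - 0).toNat))
      (funext fun j => ?_)
    have hj : ((1 : Int) + (j : Int)).toNat = j + 1 := by omega
    rw [hj]
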